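-- pv_equiv track=rewrite | github.com/dylanxlam/CS313E_notes | exam2/Purchase.py | filter_requests
-- ===== SOURCE A (Python) =====
-- def filter_requests(s):
--     last_idx = {character: -1 for character in s}
--
--     stack = []
--
--     for i, character in enumerate(s):
--         if i < last_idx[character]:
--             continue
--
--
--         while len(stack) > 0 and stack[-1] > character and s.find(stack[-1], i) != -1:
--             removed = stack.pop()
--
--         if character not in stack:
--             stack.append(character)
--
--
--
--     output = ''.join(stack)
--     return output
-- ===== SOURCE B (Python) =====
-- def filter_requests(s):
--     # Recursive-descent reformulation: each character kept on the (implicit) stack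
--     # owns one recursion level; popping = returning to the caller, the output is
--     # assembled from survivor lists on the way back.  A last-occurrence table
--     # replaces the repeated s.find scans.
--     n = len(s)
--     last = {}
--     for j, ch in enumerate(s):
--         last[ch] = j
--
--     def place(c, j, below):
--         # Scan s[j:] while c is the topmost stacked character; `below` holds the
--         # characters stacked beneath c.  Returns (j2, None) if c is popped by
--         # s[j2] (the caller re-examines s[j2]), else (n, survivors) where
--         # survivors lists c and the surviving characters placed above it,
--         # bottom-to-top.
--         while j < n:
--             x = s[j]
--             if x < c and last[c] >= j:
--                 return (j, None)               # c is popped by x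
--             if x == c or x in below:
--                 j += 1                          # x already stacked: skipped
--             else:
--                 j2, res = place(x, j + 1, below | {c})
--                 if res is not None:
--                     return (n, [c] + res)       # everything above survived
--                 j = j2                          # x was popped at j2: re-examine s[j2]
--         return (n, [c])
--
--     j = 0
--     while j < n:
--         j2, res = place(s[j], j + 1, frozenset())
--         if res is not None:
--             return ''.join(res)
--         j = j2
--     return ''
-- ===== Notes on version B (the rewrite author's own statement) =====
-- stated objective: alternative
-- what changed: B replaces A's loop-with-explicit-stack by a recursive descent in which each stacked character owns one recursion level (popping = returning to the caller), a last-occurrence table built once replaces A's repeated s.find scans, a set of the characters below replaces A's linear stack-membership scan, and the output is assembled by concatenating survivor lists on return instead of joining a mutated list.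
import Mathlib
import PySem

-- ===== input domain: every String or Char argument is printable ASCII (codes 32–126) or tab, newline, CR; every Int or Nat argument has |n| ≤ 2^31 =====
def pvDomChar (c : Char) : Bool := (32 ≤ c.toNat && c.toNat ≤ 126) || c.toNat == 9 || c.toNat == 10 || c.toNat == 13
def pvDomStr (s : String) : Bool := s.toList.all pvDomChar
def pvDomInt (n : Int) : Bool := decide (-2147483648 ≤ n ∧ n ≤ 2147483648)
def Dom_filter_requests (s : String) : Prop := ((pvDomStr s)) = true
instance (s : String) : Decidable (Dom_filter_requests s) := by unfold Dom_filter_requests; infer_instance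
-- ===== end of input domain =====

-- B re-derives A's result by recursive descent: each stacked character owns one recursion
-- level (popping = returning to the caller), a last-occurrence table replaces A's repeated
-- s.find scans, and the output is assembled from survivor lists on return; an alternative
-- structure, proved to return A's exact value on every input.

-- ===== PORT A =====
-- 'while len(stack) > 0 and stack[-1] > character and s.find(stack[-1], i) != -1: stack.pop()'
-- (the stack is held top-first: the list head is Python's stack[-1]; the final join reverses)
def popA (cs : List Char) (i : Int) (c : Char) : List Char → List Char
  | [] => []
  | t :: rest =>
      if t > c ∧ PySem.Chars.findFrom cs [t] i ≠ -1 then popA cs i c rest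
      else t :: rest

def filter_requests (s : String) : String :=
  let cs := s.toList
  -- last_idx = {character: -1 for character in s}
  let last_idx : PySem.Dict Char Int :=
    cs.foldl (fun d ch => d.insert ch (-1)) PySem.Dict.empty
  let stack := (PySem.List.enumerate cs).foldl (fun stack p =>
      -- 'if i < last_idx[character]: continue' — the key is always present (p.2 ∈ s), so getD is exact
      if p.1 < last_idx.getD p.2 (-1) then stack
      else
        let stack' := popA cs p.1 p.2 stack
        -- 'if character not in stack: stack.append(character)'
        if p.2 ∈ stack' then stack' else p.2 :: stack') []
  String.ofList stack.reverse        -- ''.join(stack)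

-- ===== PORT B =====
-- last = {}; for j, ch in enumerate(s): last[ch] = j
def lastTbl (cs : List Char) : PySem.Dict Char Int :=
  (PySem.List.enumerate cs).foldl (fun d p => d.insert p.2 p.1) PySem.Dict.empty

-- def place(c, j, below): scan s[j:] while c is the topmost stacked character.
-- Python's index j is mirrored by the suffix list r = s[j:] (the structural argument); the
-- fuel counter only makes this total (every recursive call strictly shortens r — proved in
-- placeB_spec below — so fuel = len(r)+1 is never exhausted); 'last[c]' is total here
-- because place is only ever called with a character c of s.
--   Sum.inl (j2, s[j2:])  =  Python's '(j2, None)'  (c popped by s[j2])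
--   Sum.inr survivors     =  Python's '(n, survivors)'
def placeB (last : PySem.Dict Char Int) :
    Nat → Char → Int → PySem.Set Char → List Char → (Int × List Char) ⊕ List Char
  | 0, _, _, _, _ => Sum.inr []                            -- fuel exhausted (never reached)
  | _ + 1, c, _, _, [] => Sum.inr [c]                      -- 'return (n, [c])'
  | fuel + 1, c, j, below, x :: r' =>
      -- 'if x < c and last[c] >= j: return (j, None)'
      if x < c ∧ last.getD c (-1) ≥ j then Sum.inl (j, x :: r')
      -- 'if x == c or x in below: j += 1'
      else if x = c ∨ x ∈ below then placeB last fuel c (j + 1) below r'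
      else
        -- 'j2, res = place(x, j + 1, below | {c})'
        match placeB last fuel x (j + 1) (PySem.Set.union below [c]) r' with
        | Sum.inr out => Sum.inr (c :: out)                -- 'if res is not None: return (n, [c] + res)'
        | Sum.inl (j2, rest2) => placeB last fuel c j2 below rest2   -- 'j = j2' (re-examine s[j2])

-- 'j = 0; while j < n: j2, res = place(s[j], j + 1, frozenset()); …'
-- (again the index j is mirrored by the suffix list r = s[j:], and fueled as above)
def mainB (last : PySem.Dict Char Int) : Nat → Int → List Char → List Char
  | 0, _, _ => []                                          -- fuel exhausted (never reached)
  | _ + 1, _, [] => []                                     -- loop exit: 'return '''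
  | fuel + 1, j, x :: r' =>
      match placeB last (r'.length + 1) x (j + 1) PySem.Set.empty r' with
      | Sum.inr out => out                                 -- 'return ''.join(res)'
      | Sum.inl (j2, rest2) => mainB last fuel j2 rest2    -- 'j = j2'

def filter_requests_alt (s : String) : String :=
  let cs := s.toList
  let last := lastTbl cs
  String.ofList (mainB last (cs.length + 1) 0 cs)

-- ===== PRECONDITION & SPEC =====
def Spec_filter_requests (s : String) (out : String) : Prop := out = filter_requests_alt s
instance (s : String) (out : String) : Decidable (Spec_filter_requests s out) := by unfold Spec_filter_requests; infer_instance

-- ===== CLAIM (what is proved, stated in full; the proofs are below) =====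
def Claim_equal_filter_requests : Prop := ∀ (s : String), Dom_filter_requests s → Spec_filter_requests s (filter_requests s)

-- ===== LEMMAS AND PROOFS =====

-- The reference machine both ports are reduced to: A's loop over the suffix r, with the
-- pop condition 's.find(t, i) != -1' / 'last[t] >= j' replaced by 't ∈ rest-after-current'.
def popS (r : List Char) (x : Char) : List Char → List Char
  | [] => []
  | t :: ts => if x < t ∧ t ∈ r then popS r x ts else t :: ts

def runS : List Char → List Char → List Char
  | st, [] => st.reverse
  | st, x :: r =>
      runS (let st' := popS r x st; if x ∈ st' then st' else x :: st') r

-- A's comprehension dict: every stored value is -1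
def lastNeg (cs : List Char) : PySem.Dict Char Int :=
  cs.foldl (fun d ch => d.insert ch (-1)) PySem.Dict.empty

-- A's loop body, named (definitionally equal to the lambda in the port)
def stepA (cs : List Char) : List Char → Int × Char → List Char := fun stack p =>
  if p.1 < (lastNeg cs).getD p.2 (-1) then stack
  else
    let stack' := popA cs p.1 p.2 stack
    if p.2 ∈ stack' then stack' else p.2 :: stack'

lemma lastNeg_getD (cs : List Char) (x : Char) : (lastNeg cs).getD x (-1) = -1 := by
  suffices h : ∀ (d : PySem.Dict Char Int), (∀ y : Char, d.getD y (-1) = -1) →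
      ∀ y, (cs.foldl (fun d ch => d.insert ch (-1)) d).getD y (-1) = -1 by
    exact h PySem.Dict.empty (fun _ => rfl) x
  induction cs with
  | nil => intro d h y; simpa using h y
  | cons a l ih =>
      intro d h y
      simp only [List.foldl_cons]
      refine ih _ (fun z => ?_) y
      rw [PySem.Dict.getD_insert]
      split <;> simp [h]

-- index of the last occurrence of t in cs (meaningful when t ∈ cs)
def lastOcc : List Char → Char → Nat
  | [], _ => 0
  | _ :: xs, t => if t ∈ xs then lastOcc xs t + 1 else 0

lemma lastTbl_getD (cs : List Char) : ∀ (st : Nat) (d0 : PySem.Dict Char Int) (t : Char),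
    ((PySem.List.enumerate cs (st : Int)).foldl (fun d p => d.insert p.2 p.1) d0).getD t (-1)
      = if t ∈ cs then ((st + lastOcc cs t : Nat) : Int) else d0.getD t (-1) := by
  induction cs with
  | nil => intro st d0 t; simp [PySem.List.enumerate]
  | cons x xs ih =>
      intro st d0 t
      rw [PySem.List.enumerate_cons]
      simp only [List.foldl_cons]
      have hcast : (st : Int) + 1 = ((st + 1 : Nat) : Int) := by push_cast; ring
      rw [hcast, ih (st + 1) (d0.insert x (st : Int)) t]
      by_cases hx : t ∈ xs
      · simp only [hx, if_true, List.mem_cons, or_true, lastOcc]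
        push_cast; ring
      · rw [if_neg hx, PySem.Dict.getD_insert]
        by_cases hxt : t = x
        · subst hxt
          simp only [List.mem_cons, true_or, if_true, lastOcc, if_neg hx]
          push_cast; ring
        · simp [hxt, hx, List.mem_cons]

lemma lastOcc_drop (cs : List Char) : ∀ (t : Char) (k : Nat), t ∈ cs →
    (t ∈ cs.drop (k + 1) ↔ k < lastOcc cs t) := by
  induction cs with
  | nil => intro t k h; simp at h
  | cons x xs ih =>
      intro t k hmem
      simp only [List.drop_succ_cons]
      by_cases hx : t ∈ xs
      · simp only [lastOcc, if_pos hx]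
        cases k with
        | zero => simp [hx]
        | succ k' => rw [ih t k' hx]; omega
      · have hxt : t = x := by
          rcases List.mem_cons.mp hmem with h | h
          · exact h
          · exact absurd h hx
        simp only [lastOcc, if_neg hx]
        constructor
        · intro h; exact absurd (List.mem_of_mem_drop h) hx
        · omega

-- B's pop test 'last[c] >= j' means exactly: c still occurs in s[j:]
lemma lastTbl_ge_iff (cs : List Char) (c : Char) (j : Nat) :
    ((lastTbl cs).getD c (-1) ≥ (j : Int)) ↔ c ∈ cs.drop j := by
  have h0 : lastTbl cs = (PySem.List.enumerate cs ((0 : Nat) : Int)).foldl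
      (fun d p => d.insert p.2 p.1) PySem.Dict.empty := by simp [lastTbl]
  rw [h0, lastTbl_getD cs 0 PySem.Dict.empty c]
  by_cases hmem : c ∈ cs
  · rw [if_pos hmem]
    cases j with
    | zero => simpa using hmem
    | succ k =>
        rw [lastOcc_drop cs c k hmem]
        constructor
        · intro h; have : (k : Int) < ((0 + lastOcc cs c : Nat) : Int) := by omega
          push_cast at this; omega
        · intro h; push_cast; omega
  · rw [if_neg hmem]
    constructor
    · intro h
      have h0' : ((PySem.Dict.empty : PySem.Dict Char Int).getD c (-1)) = -1 := rfl
      rw [h0'] at h; omega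
    · intro h; exact absurd (List.mem_of_mem_drop h) hmem

-- A's pop test 's.find(t, i) != -1' means the same, given t ≠ s[i]
lemma findFrom_iff_mem (cs : List Char) (k : Nat) (hk : k < cs.length) (t : Char)
    (ht : t ≠ cs[k]) :
    (PySem.Chars.findFrom cs [t] (k : Int) ≠ -1) ↔ t ∈ cs.drop (k + 1) := by
  have h1 : (PySem.Chars.findFrom cs [t] (k : Int) ≠ -1) ↔ [t] <:+: cs.drop k := by
    rw [Ne, PySem.Chars.findFrom_natCast_eq_neg_one_iff cs [t] k (le_of_lt hk), not_not]
  have h2 : ([t] <:+: cs.drop k) ↔ t ∈ cs.drop k := List.singleton_infix_iff t _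
  have h3 : (t ∈ cs.drop k) ↔ t ∈ cs.drop (k + 1) := by
    rw [List.drop_eq_getElem_cons hk, List.mem_cons]
    simp [ht]
  rw [h1, h2, h3]

-- the two pop loops agree
lemma popA_eq_popS (cs : List Char) (k : Nat) (hk : k < cs.length) :
    ∀ st, popA cs (k : Int) cs[k] st = popS (cs.drop (k + 1)) cs[k] st := by
  intro st
  induction st with
  | nil => rfl
  | cons t ts ih =>
      have hcond : (t > cs[k] ∧ PySem.Chars.findFrom cs [t] (k : Int) ≠ -1) ↔
          (cs[k] < t ∧ t ∈ cs.drop (k + 1)) := by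
        constructor
        · rintro ⟨h1, h2⟩; exact ⟨h1, (findFrom_iff_mem cs k hk t (ne_of_gt h1)).mp h2⟩
        · rintro ⟨h1, h2⟩; exact ⟨h1, (findFrom_iff_mem cs k hk t (ne_of_gt h1)).mpr h2⟩
      by_cases h : cs[k] < t ∧ t ∈ cs.drop (k + 1)
      · simp only [popA, popS, if_pos h, if_pos (hcond.mpr h), ih]
      · simp only [popA, popS, if_neg h, if_neg (mt hcond.mp h)]

-- ===== bridge: port A equals the reference machine =====
lemma foldA_runS (cs : List Char) : ∀ (m k : Nat) (st : List Char), m = cs.length - k →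
    ((PySem.List.enumerate (cs.drop k) (k : Int)).foldl (stepA cs) st).reverse
      = runS st (cs.drop k) := by
  intro m
  induction m with
  | zero =>
      intro k st hm
      have hk : cs.length ≤ k := by omega
      rw [List.drop_eq_nil_of_le hk]
      simp [PySem.List.enumerate, runS]
  | succ m ih =>
      intro k st hm
      by_cases hk : k < cs.length
      · rw [List.drop_eq_getElem_cons hk, PySem.List.enumerate_cons, List.foldl_cons]
        have hstep : stepA cs st ((k : Int), cs[k])
            = (let st' := popS (cs.drop (k + 1)) cs[k] st;
               if cs[k] ∈ st' then st' else cs[k] :: st') := by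
          simp only [stepA, lastNeg_getD]
          rw [if_neg (by omega), popA_eq_popS cs k hk st]
        have hcast : (k : Int) + 1 = ((k + 1 : Nat) : Int) := by push_cast; ring
        rw [hstep, hcast, ih (k + 1) _ (by omega)]
        simp only [runS]
      · rw [List.drop_eq_nil_of_le (by omega)]
        simp [PySem.List.enumerate, runS]

-- ===== bridge: port B equals the reference machine =====
-- place's contract: while c sits on top of stack stB (whose character set is `below`),
-- it consumes the suffix exactly as the reference machine does.
lemma placeB_spec (cs : List Char) :
    ∀ (fuel : Nat) (j : Nat) (c : Char) (below : PySem.Set Char) (stB : List Char),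
    (cs.drop j).length < fuel → (∀ y, y ∈ below ↔ y ∈ stB) →
    (match placeB (lastTbl cs) fuel c (j : Int) below (cs.drop j) with
     | Sum.inl (j2, rest2) => ∃ k2 : Nat, j2 = (k2 : Int) ∧ rest2 = cs.drop k2 ∧ j ≤ k2 ∧
         runS (c :: stB) (cs.drop j) = runS stB rest2
     | Sum.inr out => runS (c :: stB) (cs.drop j) = stB.reverse ++ out) := by
  intro fuel
  induction fuel with
  | zero => intro j c below stB hlen _; omega
  | succ fuel ih =>
      intro j c below stB hlen hbelow
      cases hdrop : cs.drop j with
      | nil => simp [placeB, runS]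
      | cons x r' =>
          have hlj : (cs.drop j).length = r'.length + 1 := by rw [hdrop]; simp
          have hj : j < cs.length := by simp at hlj; omega
          have hcons := (List.drop_eq_getElem_cons hj).symm.trans hdrop
          have hr' : cs.drop (j + 1) = r' := (List.cons.injEq _ _ _ _ ▸ hcons).2
          have hlenr' : (cs.drop (j + 1)).length < fuel := by
            rw [hr']
            rw [hdrop] at hlen
            simp at hlen ⊢
            omega
          simp only [placeB]
          by_cases hpop : x < c ∧ (lastTbl cs).getD c (-1) ≥ (j : Int)
          · rw [if_pos hpop]
            refine ⟨j, rfl, hdrop.symm, le_refl j, ?_⟩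
            have hcr' : c ∈ r' := by
              have hcd : c ∈ cs.drop j := (lastTbl_ge_iff cs c j).mp hpop.2
              rw [hdrop] at hcd
              rcases List.mem_cons.mp hcd with h | h
              · exact absurd h.symm (ne_of_gt hpop.1).symm
              · exact h
            simp only [runS, popS]
            rw [if_pos (show x < c ∧ c ∈ r' from ⟨hpop.1, hcr'⟩)]
          · rw [if_neg hpop]
            have hnopop : ¬(x < c ∧ c ∈ r') := by
              rintro ⟨h1, h2⟩
              exact hpop ⟨h1, (lastTbl_ge_iff cs c j).mpr
                (by rw [hdrop]; exact List.mem_cons_of_mem _ h2)⟩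
            have hpopS : popS r' x (c :: stB) = c :: stB := by
              simp only [popS, if_neg hnopop]
            have hcast : (j : Int) + 1 = ((j + 1 : Nat) : Int) := by push_cast; ring
            by_cases hskip : x = c ∨ x ∈ below
            · rw [if_pos hskip, hcast]
              have hxin : x ∈ c :: stB := by
                rcases hskip with h | h
                · exact h ▸ List.mem_cons_self ..
                · exact List.mem_cons_of_mem _ ((hbelow x).mp h)
              have hrunS : runS (c :: stB) (x :: r') = runS (c :: stB) r' := by
                simp only [runS]
                rw [hpopS, if_pos hxin]
              have hIH := ih (j + 1) c below stB hlenr' hbelow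
              rw [hr'] at hIH
              rcases hres : placeB (lastTbl cs) fuel c ((j + 1 : Nat) : Int) below r' with p | out
              · rcases p with ⟨j2, rest2⟩
                rw [hres] at hIH
                obtain ⟨k2, h1, h2, h3, h4⟩ := hIH
                exact ⟨k2, h1, h2, by omega, hrunS.trans h4⟩
              · rw [hres] at hIH
                exact hrunS.trans hIH
            · rw [if_neg hskip, hcast]
              rw [not_or] at hskip
              have hxout : x ∉ c :: stB := by
                intro hmem
                rcases List.mem_cons.mp hmem with h | h
                · exact hskip.1 h
                · exact hskip.2 ((hbelow x).mpr h)
              have hrunS : runS (c :: stB) (x :: r') = runS (x :: c :: stB) r' := by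
                simp only [runS]
                rw [hpopS, if_neg hxout]
              have hbelow' : ∀ y, y ∈ PySem.Set.union below [c] ↔ y ∈ c :: stB := by
                intro y
                simp only [PySem.Set.mem_union, List.mem_cons, List.not_mem_nil, or_false,
                  hbelow y]
                tauto
              have hIH := ih (j + 1) x (PySem.Set.union below [c]) (c :: stB) hlenr' hbelow'
              rw [hr'] at hIH
              rcases hres : placeB (lastTbl cs) fuel x ((j + 1 : Nat) : Int)
                  (PySem.Set.union below [c]) r' with p | out
              · rcases p with ⟨j2, rest2⟩
                rw [hres] at hIH
                obtain ⟨k2, h1, h2, h3, h4⟩ := hIH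
                subst h1; subst h2
                -- continue scanning at this level from position k2
                have hlen2 : (cs.drop k2).length < fuel := by
                  have e2 : (cs.drop (j + 1)).length < fuel := hlenr'
                  simp at e2 ⊢
                  omega
                have hIH2 := ih k2 c below stB hlen2 hbelow
                show (match placeB (lastTbl cs) fuel c ((k2 : Nat) : Int) below (cs.drop k2) with
                  | Sum.inl (j2, rest2) => ∃ k3 : Nat, j2 = (k3 : Int) ∧ rest2 = cs.drop k3 ∧
                      j ≤ k3 ∧ runS (c :: stB) (x :: r') = runS stB rest2
                  | Sum.inr out => runS (c :: stB) (x :: r') = stB.reverse ++ out)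
                rcases hres2 : placeB (lastTbl cs) fuel c ((k2 : Nat) : Int) below
                    (cs.drop k2) with p2 | out2
                · rcases p2 with ⟨j3, rest3⟩
                  rw [hres2] at hIH2
                  obtain ⟨k3, g1, g2, g3, g4⟩ := hIH2
                  exact ⟨k3, g1, g2, by omega, hrunS.trans (h4.trans g4)⟩
                · rw [hres2] at hIH2
                  exact hrunS.trans (h4.trans hIH2)
              · rw [hres] at hIH
                rw [hrunS, hIH]
                simp

-- the top-level loop equals the reference machine started on the empty stack
lemma mainB_runS (cs : List Char) :
    ∀ (fuel : Nat) (j : Nat), (cs.drop j).length < fuel →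
    mainB (lastTbl cs) fuel (j : Int) (cs.drop j) = runS [] (cs.drop j) := by
  intro fuel
  induction fuel with
  | zero => intro j hlen; omega
  | succ fuel ih =>
      intro j hlen
      cases hdrop : cs.drop j with
      | nil => simp [mainB, runS]
      | cons x r' =>
          have hlj : (cs.drop j).length = r'.length + 1 := by rw [hdrop]; simp
          have hj : j < cs.length := by simp at hlj; omega
          have hcons := (List.drop_eq_getElem_cons hj).symm.trans hdrop
          have hr' : cs.drop (j + 1) = r' := (List.cons.injEq _ _ _ _ ▸ hcons).2
          have hlenr' : (cs.drop (j + 1)).length < r'.length + 1 := by rw [hr']; omega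
          have hspec := placeB_spec cs (r'.length + 1) (j + 1) x PySem.Set.empty []
            hlenr' (by intro y; simp [PySem.Set.empty])
          rw [hr'] at hspec
          have hcast : (j : Int) + 1 = ((j + 1 : Nat) : Int) := by push_cast; ring
          simp only [mainB, hcast]
          -- the reference machine pushes x onto the empty stack
          have hstart : runS [] (x :: r') = runS [x] r' := by
            simp [runS, popS]
          rcases hres : placeB (lastTbl cs) (r'.length + 1) x ((j + 1 : Nat) : Int)
              PySem.Set.empty r' with p | out
          · rcases p with ⟨j2, rest2⟩
            rw [hres] at hspec
            obtain ⟨k2, h1, h2, h3, h4⟩ := hspec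
            subst h1; subst h2
            have hlen2 : (cs.drop k2).length < fuel := by
              rw [hdrop] at hlen
              have e2 : (cs.drop (j + 1)).length < r'.length + 1 := hlenr'
              simp at e2 hlen ⊢
              omega
            show mainB (lastTbl cs) fuel ((k2 : Nat) : Int) (cs.drop k2) = runS [] (x :: r')
            rw [ih k2 hlen2, hstart, ← h4]
          · rw [hres] at hspec
            show out = runS [] (x :: r')
            rw [hstart]
            simpa using hspec.symm

-- ===== VERDICT (by name: the statement is the Claim_ definition above) =====
theorem filter_requests_spec : Claim_equal_filter_requests := by
  intro s _
  unfold Spec_filter_requests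
  have hA : filter_requests s = String.ofList (runS [] s.toList) := by
    show String.ofList (((PySem.List.enumerate s.toList 0).foldl (stepA s.toList) []).reverse)
      = String.ofList (runS [] s.toList)
    have h := foldA_runS s.toList (s.toList.length - 0) 0 [] rfl
    simp only [List.drop_zero, Nat.cast_zero] at h
    rw [h]
  have hB : filter_requests_alt s = String.ofList (runS [] s.toList) := by
    show String.ofList (mainB (lastTbl s.toList) (s.toList.length + 1) 0 s.toList)
      = String.ofList (runS [] s.toList)
    have h := mainB_runS s.toList (s.toList.length + 1) 0 (by simp)
    simp only [List.drop_zero, Nat.cast_zero] at h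
    rw [h]
  rw [hA, hB]
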